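-- pv_equiv track=rewrite | github.com/VitaminC1000/Coding_test | 프로그래머스/2/42626. 더 맵게/더 맵게.py | solution
-- ===== SOURCE A (Python) =====
-- import heapq
--
-- def solution(scoville, K):
--     answer = 0
--     heapq.heapify(scoville)
--
--     while scoville[0] < K:
--         try:
--             answer += 1
--             heapq.heappush(scoville, heapq.heappop(scoville)+2*heapq.heappop(scoville))
--         except IndexError:
--             return -1
--
--     return answer
-- ===== SOURCE B (Python) =====
-- def solution(scoville, K):
--     # Sorted-list strategy instead of a heap: sort once, repeatedly take the two
--     # front (smallest) elements and insert the mix back at its sorted position.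
--     lst = sorted(scoville)
--     answer = 0
--     while lst[0] < K:
--         if len(lst) < 2:
--             return -1
--         mixed = lst[0] + 2 * lst[1]
--         rest = lst[2:]
--         i = 0
--         while i < len(rest) and rest[i] < mixed:
--             i += 1
--         rest.insert(i, mixed)
--         lst = rest
--         answer += 1
--     return answer
-- ===== Notes on version B (the rewrite author's own statement) =====
-- stated objective: alternative
-- what changed: Replaces the binary heap with a single ascending sorted list: sort once, repeatedly take the two front elements and splice the mix back in at its sorted position by a linear scan, instead of heapify/heappop/heappush sift operations.
import Mathlib
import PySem

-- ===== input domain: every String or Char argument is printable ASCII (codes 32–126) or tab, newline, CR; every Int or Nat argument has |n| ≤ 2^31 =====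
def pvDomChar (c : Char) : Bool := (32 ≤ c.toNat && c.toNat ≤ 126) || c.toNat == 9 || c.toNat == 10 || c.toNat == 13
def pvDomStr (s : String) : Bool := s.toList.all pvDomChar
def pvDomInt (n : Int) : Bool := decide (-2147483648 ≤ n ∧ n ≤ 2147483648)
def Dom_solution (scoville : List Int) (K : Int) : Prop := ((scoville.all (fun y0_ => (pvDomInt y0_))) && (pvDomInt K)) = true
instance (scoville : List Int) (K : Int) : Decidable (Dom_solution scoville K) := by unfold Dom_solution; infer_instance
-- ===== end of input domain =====

-- B replaces the heap by a sorted list that is rebuilt by ordered insertion (alternative data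
-- structure, not claimed faster). Python A mutates `scoville` into heap order (B does not);
-- the equivalence proved here is about the RETURN value only.

-- ===== PORT A =====
-- PySem has no heapq, so the heapq library calls are ported at their documented contract:
-- the heap is modelled by the list of its elements, heappop returns (and removes) the minimum,
-- heappush adds the element, heapify rearranges in place (irrelevant to the model).
def pyHeappop? (heap : List Int) : Option (Int × List Int) :=
  match PySem.List.min? heap (fun x => x) with
  | none => none
  | some m => (PySem.List.remove? heap m).map (fun t => (m, t))

theorem length_pyHeappop? {heap : List Int} {m : Int} {t : List Int}
    (h : pyHeappop? heap = some (m, t)) : t.length + 1 = heap.length := by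
  unfold pyHeappop? at h
  cases hmin : PySem.List.min? heap (fun x => x) with
  | none => rw [hmin] at h; exact absurd h (by simp)
  | some v =>
    rw [hmin] at h
    dsimp only at h
    have hmem : v ∈ heap := PySem.List.min?_mem hmin
    rw [PySem.List.remove?_eq_some_erase heap v hmem] at h
    simp only [Option.map_some, Option.some.injEq, Prod.mk.injEq] at h
    obtain ⟨hv, ht⟩ := h
    have := List.length_erase_of_mem hmem
    have hpos := List.length_pos_of_mem hmem
    subst ht
    omega

-- the while loop of A: while scoville[0] < K: answer += 1; push(pop() + 2*pop()); IndexError → -1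
def solutionGo (K : Int) (heap : List Int) (answer : Int) : Int :=
  match h1 : pyHeappop? heap with
  | none => answer  -- empty heap: Python raises IndexError at scoville[0]; excluded by Pre_
  | some (m, rest) =>
    if m < K then
      match h2 : pyHeappop? rest with
      | none => -1
      | some (b, rest2) => solutionGo K (rest2 ++ [m + 2 * b]) (answer + 1)
    else answer
termination_by heap.length
decreasing_by
  have e1 := length_pyHeappop? h1
  have e2 := length_pyHeappop? h2
  simp only [List.length_append, List.length_cons, List.length_nil]
  omega

def solution (scoville : List Int) (K : Int) : Int :=
  solutionGo K scoville 0

-- ===== PORT B =====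
-- the inner scan of Source B: advance past the elements below `mixed`, insert `mixed` there
def insertSorted (rest : List Int) (mixed : Int) : List Int :=
  match rest with
  | [] => [mixed]
  | x :: xs => if x < mixed then x :: insertSorted xs mixed else mixed :: x :: xs

theorem length_insertSorted (rest : List Int) (mixed : Int) :
    (insertSorted rest mixed).length = rest.length + 1 := by
  induction rest with
  | nil => rfl
  | cons x xs ih => unfold insertSorted; split <;> simp [ih]

-- the while loop of Source B over the sorted list
def altGo (K : Int) (lst : List Int) (answer : Int) : Int :=
  match lst with
  | [] => answer  -- Python raises IndexError at lst[0]; excluded by Pre_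
  | a :: rest =>
    if a < K then
      match rest with
      | [] => -1
      | b :: rest2 => altGo K (insertSorted rest2 (a + 2 * b)) (answer + 1)
    else answer
termination_by lst.length
decreasing_by
  simp [length_insertSorted]

def solution_alt (scoville : List Int) (K : Int) : Int :=
  altGo K (PySem.List.sorted scoville (fun x => x) false) 0

-- ===== PRECONDITION & SPEC =====
-- Pre_ excludes only the empty list, on which both Pythons raise IndexError.
def Pre_solution (scoville : List Int) (K : Int) : Prop := scoville ≠ []
instance (scoville : List Int) (K : Int) : Decidable (Pre_solution scoville K) := by unfold Pre_solution; infer_instance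
def pvWitness_solution : List Int × Int := ([1, 2, 3, 9, 10, 12], 7)

def Spec_solution (scoville : List Int) (K : Int) (out : Int) : Prop := out = solution_alt scoville K
instance (scoville : List Int) (K : Int) (out : Int) : Decidable (Spec_solution scoville K out) := by unfold Spec_solution; infer_instance

-- ===== CLAIM (what is proved, stated in full; the proofs are below) =====
def Claim_equal_solution : Prop := ∀ (scoville : List Int) (K : Int), Dom_solution scoville K → Pre_solution scoville K → Spec_solution scoville K (solution scoville K)

-- ===== LEMMAS AND PROOFS =====

-- popping from any permutation of a sorted list a :: rest yields the head a and a permutation of rest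
theorem pyHeappop?_of_perm_sorted {heap : List Int} {a : Int} {rest : List Int}
    (hperm : heap.Perm (a :: rest)) (hsorted : (a :: rest).Pairwise (· ≤ ·)) :
    ∃ t, pyHeappop? heap = some (a, t) ∧ t.Perm rest := by
  have hamem : a ∈ heap := hperm.mem_iff.2 List.mem_cons_self
  cases hmin : PySem.List.min? heap (fun x => x) with
  | none =>
    have : heap = [] := (PySem.List.min?_eq_none_iff heap (fun x => x)).1 hmin
    subst this
    exact absurd hamem (by simp)
  | some m =>
    have hmmem : m ∈ heap := PySem.List.min?_mem hmin
    have hmin_le : ∀ y ∈ heap, m ≤ y := by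
      intro y hy
      simpa using PySem.List.min?_isMin hmin y hy
    have hle_all : ∀ y ∈ (a :: rest), a ≤ y := by
      intro y hy
      rcases List.mem_cons.1 hy with h | h
      · exact le_of_eq h.symm
      · exact List.rel_of_pairwise_cons hsorted h
    have hma : m = a := by
      have h1 : m ≤ a := hmin_le a hamem
      have h2 : a ≤ m := hle_all m (hperm.mem_iff.1 hmmem)
      omega
    subst hma
    refine ⟨heap.erase m, ?_, ?_⟩
    · unfold pyHeappop?
      rw [hmin]
      dsimp only
      rw [PySem.List.remove?_eq_some_erase heap m hmmem]
      rfl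
    · simpa using hperm.erase m

-- Source B's linear scan-and-insert is Mathlib's orderedInsert for (· ≤ ·)
theorem insertSorted_eq (rest : List Int) (m : Int) :
    insertSorted rest m = List.orderedInsert (· ≤ ·) m rest := by
  induction rest with
  | nil => rfl
  | cons x xs ih =>
    unfold insertSorted
    rw [List.orderedInsert]
    by_cases h : m ≤ x
    · rw [if_neg (by omega), if_pos h]
    · rw [if_pos (by omega), if_neg h, ih]

theorem pairwise_insertSorted {rest : List Int} (m : Int)
    (h : rest.Pairwise (· ≤ ·)) : (insertSorted rest m).Pairwise (· ≤ ·) := by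
  rw [insertSorted_eq]
  exact List.Pairwise.orderedInsert m rest h

theorem perm_insertSorted (rest : List Int) (m : Int) :
    (insertSorted rest m).Perm (m :: rest) := by
  rw [insertSorted_eq]
  exact List.perm_orderedInsert _ m rest

-- main loop equivalence: A's heap (as a multiset) against B's sorted list
theorem go_eq (K : Int) : ∀ (n : Nat) (heap lst : List Int) (answer : Int),
    heap.length = n → heap.Perm lst → lst.Pairwise (· ≤ ·) →
    solutionGo K heap answer = altGo K lst answer := by
  intro n
  induction n using Nat.strong_induction_on with
  | _ n ih =>
    intro heap lst answer hlen hperm hsorted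
    cases lst with
    | nil =>
      have : heap = [] := List.Perm.eq_nil hperm
      subst this
      rw [solutionGo, altGo.eq_def]
      simp [pyHeappop?, PySem.List.min?]
    | cons a rest =>
      obtain ⟨t, hpop, htperm⟩ := pyHeappop?_of_perm_sorted hperm hsorted
      rw [solutionGo, altGo.eq_def]
      rw [hpop]
      by_cases hK : a < K
      · simp only [if_pos hK]
        cases rest with
        | nil =>
          have : t = [] := List.Perm.eq_nil htperm
          subst this
          simp [pyHeappop?, PySem.List.min?]
        | cons b rest2 =>
          have hrs : (b :: rest2).Pairwise (· ≤ ·) := (List.pairwise_cons.1 hsorted).2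
          obtain ⟨t2, hpop2, ht2perm⟩ := pyHeappop?_of_perm_sorted htperm hrs
          rw [hpop2]
          have hperm' : (t2 ++ [a + 2 * b]).Perm (insertSorted rest2 (a + 2 * b)) :=
            ((List.perm_append_singleton _ _).trans (List.Perm.cons _ ht2perm)).trans
              (perm_insertSorted rest2 (a + 2 * b)).symm
          have hsorted' : (insertSorted rest2 (a + 2 * b)).Pairwise (· ≤ ·) :=
            pairwise_insertSorted _ (List.Pairwise.sublist (by simp) hrs)
          have hlen' : (t2 ++ [a + 2 * b]).length < n := by
            have e1 := length_pyHeappop? hpop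
            have e2 := length_pyHeappop? hpop2
            simp only [List.length_append, List.length_cons, List.length_nil]
            omega
          exact ih _ hlen' _ _ _ rfl hperm' hsorted'
      · simp [hK]

-- ===== VERDICT (by name: the statement is the Claim_ definition above) =====
theorem solution_spec : Claim_equal_solution := by
  intro scoville K _ _
  unfold Spec_solution solution solution_alt
  exact go_eq K scoville.length scoville _ 0 rfl
    (PySem.List.sorted_perm scoville (fun x => x) false).symm
    (by simpa using PySem.List.sorted_pairwise scoville (fun x => x))
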